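-- pv_equiv track=rewrite | github.com/S1LV3RJ1NX/CodingNinjas-DSA | 04 - MultiDimensional Arrays/09 - empty_cells_in_matrix.py | emptyCells
-- ===== SOURCE A (Python) =====
-- def emptyCells(N, K, tasks):
--     # Write your code here.
--     row, col = N,N
--     row_set, col_set = set(), set()
--     ans = []
--
--     for i in range(K):
--         r, c = tasks[i][0], tasks[i][1]
--
--         if r not in row_set:
--             row_set.add(r)
--             row -=1
--
--         if c not in col_set:
--             col_set.add(c)
--             col -= 1
--
--         ans.append(row*col)
--
--     return ans
-- ===== SOURCE B (Python) =====
-- def emptyCells(N, K, tasks):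
--     placed = tasks[:max(K, 0)]
--     rows = [t[0] for t in placed]
--     cols = [t[1] for t in placed]
--     return [(N - len(set(rows[:i + 1]))) * (N - len(set(cols[:i + 1])))
--             for i in range(len(placed))]
-- ===== Notes on version B (the rewrite author's own statement) =====
-- stated objective: alternative
-- what changed: B replaces A's stateful single pass (two incrementally-updated sets plus two decremented counters with membership branches) by a staged, stateless computation: it slices the first K tasks, projects the row and column coordinate lists, and for each index i counts distinct coordinates directly as len(set(prefix)) of each list, multiplying (N - distinct rows) * (N - distinct cols); there is no loop-carried state at all.
import Mathlib
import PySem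

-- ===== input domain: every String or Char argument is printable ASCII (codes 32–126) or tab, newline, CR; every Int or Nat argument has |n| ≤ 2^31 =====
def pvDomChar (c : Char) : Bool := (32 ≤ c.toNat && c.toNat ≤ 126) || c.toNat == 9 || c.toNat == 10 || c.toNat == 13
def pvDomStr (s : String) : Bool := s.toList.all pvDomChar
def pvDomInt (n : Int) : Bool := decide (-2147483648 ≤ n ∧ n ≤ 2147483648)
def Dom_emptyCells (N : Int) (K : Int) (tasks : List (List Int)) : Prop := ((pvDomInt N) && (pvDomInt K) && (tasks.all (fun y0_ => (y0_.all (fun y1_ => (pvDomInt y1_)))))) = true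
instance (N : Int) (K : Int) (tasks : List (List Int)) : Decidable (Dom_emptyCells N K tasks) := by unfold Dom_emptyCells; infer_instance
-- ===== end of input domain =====

-- B replaces A's stateful pass (incremental sets + decremented counters) by a stateless staged
-- computation: project the row/col coordinate lists of the first K tasks, then count distinct
-- coordinates of each prefix directly with len(set(prefix)). Same values, no loop-carried state.

-- ===== PORT A =====
-- A's loop body; state = (row, col, row_set, col_set, ans), exactly A's loop variables
def emptyCellsStepA (st : Int × Int × PySem.Set Int × PySem.Set Int × List Int)
    (t : List Int) : Int × Int × PySem.Set Int × PySem.Set Int × List Int :=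
  let r := PySem.List.pyGetD t 0 0
  let c := PySem.List.pyGetD t 1 0
  let rowSet := if PySem.Set.contains st.2.2.1 r then st.2.2.1 else PySem.Set.add st.2.2.1 r
  let row    := if PySem.Set.contains st.2.2.1 r then st.1 else st.1 - 1
  let colSet := if PySem.Set.contains st.2.2.2.1 c then st.2.2.2.1 else PySem.Set.add st.2.2.2.1 c
  let col    := if PySem.Set.contains st.2.2.2.1 c then st.2.1 else st.2.1 - 1
  (row, col, rowSet, colSet, st.2.2.2.2 ++ [row * col])

def emptyCells (N : Int) (K : Int) (tasks : List (List Int)) : List Int :=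
  ((PySem.List.pyRange 0 K 1).foldl
    (fun st i => emptyCellsStepA st (PySem.List.pyGetD tasks i []))
    (N, N, PySem.Set.empty, PySem.Set.empty, [])).2.2.2.2

-- ===== PORT B =====
def emptyCells_alt (N : Int) (K : Int) (tasks : List (List Int)) : List Int :=
  let placed := PySem.List.slice tasks none (some (max K 0))
  let rows := placed.map (fun t => PySem.List.pyGetD t 0 0)
  let cols := placed.map (fun t => PySem.List.pyGetD t 1 0)
  (List.range placed.length).map (fun i =>
    (N - PySem.Set.len (PySem.Set.ofList (rows.take (i + 1)))) *
    (N - PySem.Set.len (PySem.Set.ofList (cols.take (i + 1)))))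

-- ===== PRECONDITION & SPEC =====
-- A raises IndexError when K > len(tasks) or some of the first K tasks has fewer than 2 entries.
def Pre_emptyCells (N : Int) (K : Int) (tasks : List (List Int)) : Prop :=
  K ≤ (tasks.length : Int) ∧ ∀ t ∈ tasks.take K.toNat, 2 ≤ t.length
instance (N : Int) (K : Int) (tasks : List (List Int)) : Decidable (Pre_emptyCells N K tasks) := by
  unfold Pre_emptyCells; infer_instance
def pvWitness_emptyCells : Int × Int × List (List Int) := (3, 2, [[0, 1], [0, 2]])

def Spec_emptyCells (N : Int) (K : Int) (tasks : List (List Int)) (out : List Int) : Prop := out = emptyCells_alt N K tasks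
instance (N : Int) (K : Int) (tasks : List (List Int)) (out : List Int) : Decidable (Spec_emptyCells N K tasks out) := by unfold Spec_emptyCells; infer_instance

-- ===== CLAIM (what is proved, stated in full; the proofs are below) =====
def Claim_equal_emptyCells : Prop := ∀ (N : Int) (K : Int) (tasks : List (List Int)), Dom_emptyCells N K tasks → Pre_emptyCells N K tasks → Spec_emptyCells N K tasks (emptyCells N K tasks)

-- ===== LEMMAS AND PROOFS =====

-- proof-only intermediate form: A's per-step output with the sets made explicit
def goMid (N : Int) (rows cols : PySem.Set Int) : List (List Int) → List Int
  | [] => []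
  | t :: rest =>
    let rows' := PySem.Set.add rows (PySem.List.pyGetD t 0 0)
    let cols' := PySem.Set.add cols (PySem.List.pyGetD t 1 0)
    ((N - PySem.Set.len rows') * (N - PySem.Set.len cols')) :: goMid N rows' cols' rest

theorem stepA_set_eq (s : PySem.Set Int) (x : Int) :
    (if PySem.Set.contains s x then s else PySem.Set.add s x) = PySem.Set.add s x := by
  split_ifs with hc
  · have h : x ∈ s := by simpa using hc
    rw [PySem.Set.add_of_mem h]
  · rfl

theorem stepA_cnt_eq (N : Int) (s : PySem.Set Int) (x : Int) :
    (if PySem.Set.contains s x then N - PySem.Set.len s else N - PySem.Set.len s - 1)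
      = N - PySem.Set.len (PySem.Set.add s x) := by
  split_ifs with hc
  · have h : x ∈ s := by simpa using hc
    rw [PySem.Set.add_of_mem h]
  · have h : x ∉ s := by simpa using hc
    rw [PySem.Set.add_of_not_mem h]
    simp [PySem.Set.len]
    ring

-- A's loop over the prefix P, started from the invariant state, produces ans ++ goMid.
theorem foldl_stepA_invariant (N : Int) (P : List (List Int)) :
    ∀ (rows cols : PySem.Set Int) (ans : List Int),
      (P.foldl emptyCellsStepA
        (N - PySem.Set.len rows, N - PySem.Set.len cols, rows, cols, ans)).2.2.2.2
        = ans ++ goMid N rows cols P := by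
  induction P with
  | nil => intro rows cols ans; simp [goMid]
  | cons t rest ih =>
    intro rows cols ans
    simp only [List.foldl_cons]
    show (rest.foldl emptyCellsStepA (emptyCellsStepA _ t)).2.2.2.2 = _
    rw [show emptyCellsStepA
          (N - PySem.Set.len rows, N - PySem.Set.len cols, rows, cols, ans) t
        = (N - PySem.Set.len (PySem.Set.add rows (PySem.List.pyGetD t 0 0)),
           N - PySem.Set.len (PySem.Set.add cols (PySem.List.pyGetD t 1 0)),
           PySem.Set.add rows (PySem.List.pyGetD t 0 0),
           PySem.Set.add cols (PySem.List.pyGetD t 1 0),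
           ans ++ [(N - PySem.Set.len (PySem.Set.add rows (PySem.List.pyGetD t 0 0)))
                   * (N - PySem.Set.len (PySem.Set.add cols (PySem.List.pyGetD t 1 0)))]) from by
      dsimp only [emptyCellsStepA]
      rw [stepA_set_eq, stepA_set_eq, stepA_cnt_eq, stepA_cnt_eq]]
    rw [ih]
    simp [goMid]

-- goMid, seeded with any sets, equals B's stateless prefix-count form.
theorem goMid_eq_map (N : Int) (P : List (List Int)) :
    ∀ (rows cols : PySem.Set Int),
      goMid N rows cols P
        = (List.range P.length).map (fun i =>
            (N - PySem.Set.len (((P.map (fun t => PySem.List.pyGetD t 0 0)).take (i + 1)).foldl PySem.Set.add rows)) *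
            (N - PySem.Set.len (((P.map (fun t => PySem.List.pyGetD t 1 0)).take (i + 1)).foldl PySem.Set.add cols))) := by
  induction P with
  | nil => intro rows cols; simp [goMid]
  | cons t rest ih =>
    intro rows cols
    rw [show (t :: rest).length = rest.length + 1 from rfl, List.range_succ_eq_map]
    simp only [goMid, List.map_cons, List.map_map]
    congr 1
    rw [ih]
    apply List.map_congr_left
    intro i _
    simp [List.take_succ_cons]

theorem emptyCells_spec : Claim_equal_emptyCells := by
  intro N K tasks _ hpre
  obtain ⟨hK, _⟩ := hpre
  unfold Spec_emptyCells emptyCells emptyCells_alt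
  have hslice : PySem.List.slice tasks none (some (max K 0)) = tasks.take K.toNat := by
    rw [PySem.List.slice_to tasks (le_max_right K 0)]
    congr 1
    omega
  have hrange : PySem.List.pyRange 0 K 1
      = PySem.List.pyRange 0 ((tasks.take K.toNat).length : Int) 1 := by
    rcases le_or_gt 0 K with h0 | h0
    · congr 1
      simp [List.length_take]
      omega
    · rw [PySem.List.pyRange_one_eq_nil (by omega), PySem.List.pyRange_one_eq_nil (by simp; exact Or.inl (le_of_lt h0))]
  have hget : ∀ (st : Int × Int × PySem.Set Int × PySem.Set Int × List Int),
      ∀ i ∈ PySem.List.pyRange 0 ((tasks.take K.toNat).length : Int) 1,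
      emptyCellsStepA st (PySem.List.pyGetD tasks i [])
        = emptyCellsStepA st (PySem.List.pyGetD (tasks.take K.toNat) i []) := by
    intro st i hi
    rw [PySem.List.mem_pyRange_one] at hi
    have hle : (tasks.take K.toNat).length ≤ tasks.length := by
      simp [List.length_take]
    have hlt' : i < (tasks.length : Int) := lt_of_lt_of_le hi.2 (by exact_mod_cast hle)
    congr 1
    rw [PySem.List.pyGetD_eq_getElem tasks [] hi.1 hlt',
        PySem.List.pyGetD_eq_getElem (tasks.take K.toNat) [] hi.1 hi.2]
    exact (List.getElem_take).symm
  rw [hrange, PySem.List.foldl_congr_mem _ _ _ _ hget,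
      PySem.List.foldl_pyRange_zero_pyGetD' (tasks.take K.toNat) [] emptyCellsStepA _]
  have hinv := foldl_stepA_invariant N (tasks.take K.toNat) PySem.Set.empty PySem.Set.empty []
  have hN : N - PySem.Set.len (PySem.Set.empty : PySem.Set Int) = N := by
    simp [PySem.Set.len, PySem.Set.empty]
  rw [hN, List.nil_append] at hinv
  rw [hinv, hslice, goMid_eq_map]
  simp only [PySem.Set.ofList_eq_foldl]
  rfl
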